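-- pv_equiv track=rewrite | github.com/nroxa92/me_suite | spark_research.py | looks_like_lambda
-- ===== SOURCE A (Python) =====
-- LAMBDA_MIN_RAW = 24000  # ~0.73 lambda (bogato)
--
-- LAMBDA_MAX_RAW = 42000  # ~1.28 lambda (siromašno)
--
-- def looks_like_lambda(vals):
--     non_zero = [v for v in vals if v > 0]
--     if len(non_zero) < 6:
--         return False
--     mn, mx = min(non_zero), max(non_zero)
--     if mn < LAMBDA_MIN_RAW or mx > LAMBDA_MAX_RAW:
--         return False
--     # Mora biti blizu 32768 (lambda=1.0)
--     near_one = sum(1 for v in non_zero if 29000 < v < 37000)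
--     if near_one < len(non_zero) // 3:
--         return False
--     return True
-- ===== SOURCE B (Python) =====
-- LAMBDA_MIN_RAW = 24000
-- LAMBDA_MAX_RAW = 42000
--
--
-- def _bisect(s, x, right):
--     # index of the first element of ascending s that is >= x (> x when right)
--     lo, hi = 0, len(s)
--     while lo < hi:
--         mid = (lo + hi) // 2
--         if (s[mid] <= x) if right else (s[mid] < x):
--             lo = mid + 1
--         else:
--             hi = mid
--     return lo
--
--
-- def looks_like_lambda(vals):
--     s = sorted(v for v in vals if v > 0)
--     n = len(s)
--     if n < 6:
--         return False
--     if s[0] < LAMBDA_MIN_RAW or s[-1] > LAMBDA_MAX_RAW: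
--         return False
--     # window (29000, 37000) is contiguous in the sorted list: count it by binary search
--     near_one = _bisect(s, 37000, False) - _bisect(s, 29000, True)
--     return near_one >= n // 3
-- ===== Notes on version B (the rewrite author's own statement) =====
-- stated objective: alternative
-- what changed: Instead of A's filtered list with separate min/max/counting passes, B sorts the positive values once, reads min and max as the first and last element, and counts the near-one window (contiguous in sorted order) with two hand-written binary searches.
import Mathlib
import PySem

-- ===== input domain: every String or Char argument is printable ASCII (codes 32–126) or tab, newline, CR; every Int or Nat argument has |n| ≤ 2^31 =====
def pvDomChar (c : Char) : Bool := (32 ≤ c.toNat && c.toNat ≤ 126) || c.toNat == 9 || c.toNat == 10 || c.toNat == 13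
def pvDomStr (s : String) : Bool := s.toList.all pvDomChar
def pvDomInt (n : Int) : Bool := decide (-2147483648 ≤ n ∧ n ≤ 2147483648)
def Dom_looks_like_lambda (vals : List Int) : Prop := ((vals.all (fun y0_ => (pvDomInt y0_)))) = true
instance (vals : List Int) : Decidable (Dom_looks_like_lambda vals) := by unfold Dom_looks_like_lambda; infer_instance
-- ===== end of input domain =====

-- B sorts the positives once and uses first/last element plus two binary searches for the window count,
-- instead of A's filtered list with separate min/max/counting passes; proved equal on all inputs.


-- ===== PORT A =====
def looks_like_lambda (vals : List Int) : Bool :=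
  let non_zero := vals.filter (fun v => decide (v > 0))
  if non_zero.length < 6 then false
  else
    match PySem.List.min? non_zero (fun x => x), PySem.List.max? non_zero (fun x => x) with
    | some mn, some mx =>
      if mn < 24000 ∨ mx > 42000 then false
      else
        let near_one := non_zero.foldl (fun acc v => if 29000 < v ∧ v < 37000 then acc + 1 else acc) (0 : Int)
        if near_one < PySem.Int.floordiv (non_zero.length : Int) 3 then false
        else true
    | _, _ => false

-- ===== PORT B =====
-- hand-written binary search of Source B: first index in ascending s with s[i] >= x (> x when right)
def lamBisect (s : List Int) (x : Int) (right : Bool) (lo hi : Nat) : Nat :=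
  if lo < hi then
    let mid := (lo + hi) / 2
    if (if right then decide (PySem.List.pyGetD s (mid : Int) 0 ≤ x)
        else decide (PySem.List.pyGetD s (mid : Int) 0 < x))
    then lamBisect s x right (mid + 1) hi
    else lamBisect s x right lo mid
  else lo
termination_by hi - lo
decreasing_by all_goals omega

def looks_like_lambda_alt (vals : List Int) : Bool :=
  let s := PySem.List.sorted (vals.filter (fun v => decide (v > 0))) (fun v => v)
  let n := s.length
  if n < 6 then false
  else if PySem.List.pyGetD s 0 0 < 24000 ∨ PySem.List.pyGetD s (-1) 0 > 42000 then false
  else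
    let near_one : Int := (lamBisect s 37000 false 0 n : Int) - (lamBisect s 29000 true 0 n : Int)
    decide (near_one ≥ PySem.Int.floordiv (n : Int) 3)

-- ===== PRECONDITION & SPEC =====
def Spec_looks_like_lambda (vals : List Int) (out : Bool) : Prop := out = looks_like_lambda_alt vals
instance (vals : List Int) (out : Bool) : Decidable (Spec_looks_like_lambda vals out) := by unfold Spec_looks_like_lambda; infer_instance

-- ===== CLAIM (what is proved, stated in full; the proofs are below) =====
def Claim_equal_looks_like_lambda : Prop := ∀ (vals : List Int), Dom_looks_like_lambda vals → Spec_looks_like_lambda vals (looks_like_lambda vals)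

-- ===== LEMMAS AND PROOFS =====

-- the comparison _bisect makes at each probe, as a predicate on the probed value
def lamPred (x : Int) (right : Bool) (v : Int) : Bool :=
  if right then decide (v ≤ x) else decide (v < x)

lemma lamPred_mono (x : Int) (right : Bool) (a b : Int) (hab : a ≤ b)
    (hb : lamPred x right b = true) : lamPred x right a = true := by
  unfold lamPred at *; cases right <;> simp_all <;> omega

-- in a sorted list, the indices satisfying a downward-closed predicate are exactly the first countP ones
lemma split_point (s : List Int) (p : Int → Bool)
    (hmono : ∀ a b : Int, a ≤ b → p b = true → p a = true)
    (hs : s.Pairwise (· ≤ ·)) :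
    ∀ j, j < s.length → (j < s.countP p ↔ p (s.getD j 0) = true) := by
  induction s with
  | nil => intro j hj; simp at hj
  | cons a t ih =>
    intro j hj
    rcases List.pairwise_cons.mp hs with ⟨ha, ht⟩
    by_cases hp : p a = true
    · rw [List.countP_cons, if_pos hp]
      cases j with
      | zero => simp [hp]
      | succ j =>
        simp only [List.getD_cons_succ]
        rw [show t.countP p + 1 = t.countP p + 1 from rfl]
        constructor
        · intro h; exact (ih ht j (by simpa using hj)).mp (by omega)
        · intro h; have := (ih ht j (by simpa using hj)).mpr h; omega
    · have ht0 : t.countP p = 0 := by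
        rw [List.countP_eq_zero]
        intro b hb hpb
        exact hp (hmono a b (ha b hb) hpb)
      rw [List.countP_cons, if_neg hp, ht0]
      cases j with
      | zero => simpa using hp
      | succ j =>
        simp only [List.getD_cons_succ]
        constructor
        · omega
        · intro h
          have hjt : j < t.length := by simpa using hj
          have hmem : t.getD j 0 ∈ t := by
            rw [List.getD_eq_getElem t 0 hjt]; exact List.getElem_mem hjt
          have : t.countP p ≠ 0 := by
            intro h0
            exact (List.countP_eq_zero.mp h0 _ hmem) h
          omega

-- the binary search lands exactly on countP, given the bracketing invariant
lemma lamBisect_eq (s : List Int) (x : Int) (right : Bool)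
    (hs : s.Pairwise (· ≤ ·)) :
    ∀ (d lo hi : Nat), hi - lo ≤ d →
      lo ≤ s.countP (lamPred x right) → s.countP (lamPred x right) ≤ hi → hi ≤ s.length →
      lamBisect s x right lo hi = s.countP (lamPred x right) := by
  intro d
  induction d with
  | zero =>
    intro lo hi hle hlo hhi _
    unfold lamBisect
    rw [if_neg (by omega)]
    omega
  | succ d ih =>
    intro lo hi hle hlo hhi hlen
    by_cases h : lo < hi
    · have hmid1 : lo ≤ (lo + hi) / 2 := by omega
      have hmid2 : (lo + hi) / 2 < hi := by omega
      have hmlt : (lo + hi) / 2 < s.length := by omega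
      have hget : PySem.List.pyGetD s (((lo + hi) / 2 : Nat) : Int) 0 = s.getD ((lo + hi) / 2) 0 :=
        PySem.List.pyGetD_natCast s _ 0
      have hsp := split_point s (lamPred x right) (lamPred_mono x right) hs ((lo + hi) / 2) hmlt
      unfold lamBisect
      rw [if_pos h]
      have hcond : (if right then decide (PySem.List.pyGetD s (((lo + hi) / 2 : Nat) : Int) 0 ≤ x)
          else decide (PySem.List.pyGetD s (((lo + hi) / 2 : Nat) : Int) 0 < x))
          = lamPred x right (s.getD ((lo + hi) / 2) 0) := by
        rw [hget]; unfold lamPred; rfl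
      simp only [hcond]
      by_cases hb : lamPred x right (s.getD ((lo + hi) / 2) 0) = true
      · rw [if_pos hb]
        have : (lo + hi) / 2 < s.countP (lamPred x right) := hsp.mpr hb
        exact ih ((lo + hi) / 2 + 1) hi (by omega) (by omega) hhi hlen
      · rw [if_neg hb]
        have : ¬ (lo + hi) / 2 < s.countP (lamPred x right) := fun hc => hb (hsp.mp hc)
        exact ih lo ((lo + hi) / 2) (by omega) hlo (by omega) (by omega)
    · unfold lamBisect
      rw [if_neg h]
      omega

-- the window count is the difference of the two boundary counts (no sortedness needed)
lemma count_split (l : List Int) :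
    l.countP (lamPred 37000 false) =
      l.countP (fun v => decide (29000 < v ∧ v < 37000)) + l.countP (lamPred 29000 true) := by
  induction l with
  | nil => rfl
  | cons a t ih =>
    simp only [List.countP_cons, lamPred] at *
    split_ifs with h1 h2 h3 h2 h3 <;> simp_all <;> omega

lemma le_getLast_of_pairwise :
    ∀ (s : List Int) (h : s ≠ []), s.Pairwise (· ≤ ·) → ∀ z ∈ s, z ≤ s.getLast h := by
  intro s
  induction s with
  | nil => intro h; exact absurd rfl h
  | cons a t ih =>
    intro _ hs z hz
    rcases List.pairwise_cons.mp hs with ⟨ha, ht⟩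
    cases t with
    | nil => simp at hz; simp [hz, List.getLast]
    | cons b u =>
      rw [List.getLast_cons (by simp)]
      rcases List.mem_cons.mp hz with rfl | hz'
      · exact le_trans (ha b (by simp))
          (ih (by simp) ht b (by simp))
      · exact ih (by simp) ht z hz'

lemma head_le_of_pairwise (a : Int) (t : List Int) (hs : (a :: t).Pairwise (· ≤ ·)) :
    ∀ z ∈ a :: t, a ≤ z := by
  rcases List.pairwise_cons.mp hs with ⟨ha, _⟩
  intro z hz
  rcases List.mem_cons.mp hz with rfl | hz'
  · exact le_refl z
  · exact ha z hz'

-- ===== VERDICT (by name: the statement is the Claim_ definition above) =====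
theorem looks_like_lambda_spec : Claim_equal_looks_like_lambda := by
  intro vals _
  unfold Spec_looks_like_lambda looks_like_lambda looks_like_lambda_alt
  set nz := vals.filter (fun v => decide (v > 0)) with hnz
  set s := PySem.List.sorted nz (fun v => v) with hsdef
  have hperm : s.Perm nz := PySem.List.sorted_perm nz (fun v => v) false
  have hpair : s.Pairwise (· ≤ ·) := PySem.List.sorted_pairwise nz (fun v => v)
  have hlen : s.length = nz.length := hperm.length_eq
  simp only [← hlen]
  by_cases h6 : s.length < 6
  · rw [if_pos h6, if_pos h6]
  · rw [if_neg h6, if_neg h6]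
    -- s and nz are nonempty
    have hsne : s ≠ [] := by
      intro h; rw [h] at h6; exact h6 (by simp)
    obtain ⟨b, t, hseq⟩ : ∃ b t, s = b :: t := by
      cases hseq : s with
      | nil => exact absurd hseq hsne
      | cons b t => exact ⟨b, t, rfl⟩
    rw [hseq] at hperm hpair hlen h6 ⊢
    clear hsne hsdef
    obtain ⟨y, t', hy⟩ : ∃ y t', nz = y :: t' := by
      cases hzeq : nz with
      | nil => rw [hzeq] at hlen; simp at hlen
      | cons y t' => exact ⟨y, t', rfl⟩
    -- A's min and max are B's first and last sorted element
    have hminA : PySem.List.min? nz (fun x => x) = some b := by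
      rw [hy, PySem.List.min?_id_cons]
      have h1 : (y :: t').min? = some (List.foldl min y t') := List.min?_cons'
      have h2 : (y :: t').min? = some b := by
        rw [List.min?_eq_some_iff]
        constructor
        · rw [← hy]; exact hperm.mem_iff.mp (by simp)
        · intro z hz
          rw [← hy] at hz
          exact head_le_of_pairwise b t hpair z (hperm.mem_iff.mpr hz)
      rw [h1] at h2; rw [h2]
    have hmaxA : PySem.List.max? nz (fun x => x) = some ((b :: t).getLast (by simp)) := by
      rw [hy, PySem.List.max?_id_cons]
      have h1 : (y :: t').max? = some (List.foldl max y t') := List.max?_cons'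
      have h2 : (y :: t').max? = some ((b :: t).getLast (by simp)) := by
        rw [List.max?_eq_some_iff]
        constructor
        · rw [← hy]
          exact hperm.mem_iff.mp (List.getLast_mem _)
        · intro z hz
          rw [← hy] at hz
          exact le_getLast_of_pairwise (b :: t) (by simp) hpair z (hperm.mem_iff.mpr hz)
      rw [h1] at h2; rw [h2]
    rw [hminA, hmaxA]
    have hget0 : PySem.List.pyGetD (b :: t) 0 0 = b := PySem.List.pyGetD_zero_cons b t 0
    have hgetL : PySem.List.pyGetD (b :: t) (-1) 0 = (b :: t).getLast (by simp) :=
      PySem.List.pyGetD_neg_one (b :: t) 0 (by simp)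
    rw [hget0, hgetL]
    dsimp only
    by_cases hmm : b < 24000 ∨ (b :: t).getLast (by simp) > 42000
    · rw [if_pos hmm, if_pos hmm]
    · rw [if_neg hmm, if_neg hmm]
      -- the two window counts agree
      have c37 := lamBisect_eq (b :: t) 37000 false hpair ((b :: t).length) 0 ((b :: t).length)
        (by omega) (by omega) List.countP_le_length (le_refl _)
      have c29 := lamBisect_eq (b :: t) 29000 true hpair ((b :: t).length) 0 ((b :: t).length)
        (by omega) (by omega) List.countP_le_length (le_refl _)
      rw [c37, c29]
      have hw : (fun (acc : Int) (v : Int) => if 29000 < v ∧ v < 37000 then acc + 1 else acc)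
          = (fun (acc : Int) (v : Int) => if (fun u => decide (29000 < u ∧ u < 37000)) v = true then acc + 1 else acc) := by
        funext acc v; simp
      have hA : nz.foldl (fun acc v => if 29000 < v ∧ v < 37000 then acc + 1 else acc) (0 : Int)
          = (nz.countP (fun v => decide (29000 < v ∧ v < 37000)) : Int) := by
        rw [hw, PySem.List.foldl_count_if]; ring
      have hcnt : nz.countP (fun v => decide (29000 < v ∧ v < 37000))
          = (b :: t).countP (fun v => decide (29000 < v ∧ v < 37000)) :=
        (hperm.countP_eq _).symm
      have hdiff : ((b :: t).countP (lamPred 37000 false) : Int)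
          - ((b :: t).countP (lamPred 29000 true) : Int)
          = ((b :: t).countP (fun v => decide (29000 < v ∧ v < 37000)) : Int) := by
        have := count_split (b :: t)
        omega
      rw [hA, hcnt, ← hdiff]
      set lhs := ((b :: t).countP (lamPred 37000 false) : Int) - ((b :: t).countP (lamPred 29000 true) : Int)
      set fd := PySem.Int.floordiv (((b :: t).length : Nat) : Int) 3
      by_cases hlt : lhs < fd
      · rw [if_pos hlt]
        exact (decide_eq_false (by omega : ¬ lhs ≥ fd)).symm
      · rw [if_neg hlt]
        exact (decide_eq_true (by omega : lhs ≥ fd)).symm
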